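-- pv_equiv track=rewrite | github.com/TimaKuDev/AI-Hanidoku | NewCode/gameLogic.py | arrayHasRange
-- ===== SOURCE A (Python) =====
-- def positiveMin(arr, arrLength):
--     """
--     returns the minimum positive integer in an array that has at least one value > 0
--     """
--     i = 0
--     while arr[i] == 0:
--         i += 1
--     mini = arr[i]
--     for x in range(i + 1, arrLength):
--         if arr[x] != 0 and arr[x] < mini:
--             mini = arr[x]
--     return mini
--
-- def arrayHasRange(arr):
--     length = len(arr)
--     maxi = max(arr)
--     if maxi == 0:
--         return True
--     check = range(positiveMin(arr,length) + 1 , maxi)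
--     missing = 0
--     for val in check:
--         if val not in arr:
--             missing += 1
--     numofzeroes = 0
--     for val in arr:
--         if val == 0:
--             numofzeroes += 1
--     if numofzeroes >= missing:
--         return True
--     return False
-- ===== SOURCE B (Python) =====
-- def arrayHasRange(arr):
--     maxi = max(arr)
--     if maxi == 0:
--         return True
--     mn = min(v for v in arr if v != 0)
--     zeros = 0
--     present = set()
--     for v in arr:
--         if v == 0:
--             zeros += 1
--         if mn < v < maxi:
--             present.add(v)
--     missing = (maxi - mn - 1) - len(present)
--     return zeros >= missing
-- ===== Notes on version B (the rewrite author's own statement) =====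
-- stated objective: faster
-- what changed: A loops over every integer in the candidate range (mn+1..max-1) doing an O(n) membership test per value; B never iterates the range: one pass over arr collects the distinct in-interval values in a set and counts zeros, and the missing count is obtained arithmetically as (max-mn-1) minus the set's size.
import Mathlib
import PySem

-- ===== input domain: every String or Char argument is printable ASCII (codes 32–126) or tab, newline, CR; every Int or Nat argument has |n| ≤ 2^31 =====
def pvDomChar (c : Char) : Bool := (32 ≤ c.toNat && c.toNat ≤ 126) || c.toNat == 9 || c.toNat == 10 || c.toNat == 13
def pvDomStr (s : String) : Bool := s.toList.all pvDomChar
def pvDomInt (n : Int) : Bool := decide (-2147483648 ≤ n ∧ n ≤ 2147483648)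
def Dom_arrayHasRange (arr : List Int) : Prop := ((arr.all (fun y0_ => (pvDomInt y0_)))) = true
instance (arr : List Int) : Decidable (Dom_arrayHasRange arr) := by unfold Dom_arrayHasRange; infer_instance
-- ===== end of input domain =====

-- B replaces A's loop over the whole candidate range (each step membership-testing against arr)
-- by a single pass over arr that collects the distinct in-interval values in a set; the missing
-- count is then interval size minus set size (objective: faster).

-- ===== PORT A =====
-- 'while arr[i] == 0: i += 1' of positiveMin; the bound test is only a totality guard
-- (Python raises IndexError off the end; A calls this only when a nonzero element exists).
def pvSkipZeros (arr : List Int) (i : Nat) : Nat :=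
  if i < arr.length ∧ arr.getD i 0 = 0 then pvSkipZeros arr (i + 1) else i
termination_by arr.length - i
decreasing_by omega

def positiveMin (arr : List Int) (arrLength : Int) : Int :=
  let i := pvSkipZeros arr 0
  let mini := PySem.List.pyGetD arr (↑i) 0
  (PySem.List.pyRange (↑i + 1) arrLength).foldl
    (fun mini x =>
      (fun mini v => if v ≠ 0 ∧ v < mini then v else mini) mini (PySem.List.pyGetD arr x 0))
    mini

def arrayHasRange (arr : List Int) : Bool :=
  let length : Int := arr.length
  match PySem.List.max? arr (fun y => y) with
  | none => false   -- empty input: Python's max([]) raises ValueError (excluded by Pre_)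
  | some maxi =>
    if maxi = 0 then true
    else
      let check := PySem.List.pyRange (positiveMin arr length + 1) maxi
      let missing : Int := check.foldl (fun m val => if val ∈ arr then m else m + 1) 0
      let numofzeroes : Int := arr.foldl (fun z val => if val = 0 then z + 1 else z) 0
      if numofzeroes ≥ missing then true else false

-- ===== PORT B =====
def arrayHasRange_alt (arr : List Int) : Bool :=
  match PySem.List.max? arr (fun y => y) with
  | none => false   -- empty input: Python's max([]) raises ValueError (excluded by Pre_)
  | some maxi =>
    if maxi = 0 then true
    else
      let mn := (PySem.List.min? (arr.filter (fun v => !decide (v = 0))) (fun y => y)).getD 0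
      let st := arr.foldl
        (fun (s : Int × PySem.Set Int) v =>
          (if v = 0 then s.1 + 1 else s.1,
           if mn < v ∧ v < maxi then s.2.add v else s.2))
        ((0 : Int), PySem.Set.ofList [])
      let missing : Int := (maxi - mn - 1) - (st.2.length : Int)
      decide (st.1 ≥ missing)

-- ===== PRECONDITION & SPEC =====
-- Pre_ excludes only the empty list, on which Python's max(arr) raises ValueError (B raises there too).
def Pre_arrayHasRange (arr : List Int) : Prop := arr ≠ []
instance (arr : List Int) : Decidable (Pre_arrayHasRange arr) := by unfold Pre_arrayHasRange; infer_instance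
def pvWitness_arrayHasRange : List Int := [0, 3, 1]

def Spec_arrayHasRange (arr : List Int) (out : Bool) : Prop := out = arrayHasRange_alt arr
instance (arr : List Int) (out : Bool) : Decidable (Spec_arrayHasRange arr out) := by unfold Spec_arrayHasRange; infer_instance

-- ===== CLAIM (what is proved, stated in full; the proofs are below) =====
def Claim_equal_arrayHasRange : Prop := ∀ (arr : List Int), Dom_arrayHasRange arr → Pre_arrayHasRange arr → Spec_arrayHasRange arr (arrayHasRange arr)

-- ===== LEMMAS AND PROOFS =====

-- A's while-loop stops at the first nonzero entry (when one exists from position i on).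
theorem pvSkipZeros_spec (arr : List Int) : ∀ (i : Nat),
    (∃ k, i ≤ k ∧ k < arr.length ∧ arr.getD k 0 ≠ 0) →
    i ≤ pvSkipZeros arr i ∧ pvSkipZeros arr i < arr.length ∧
      arr.getD (pvSkipZeros arr i) 0 ≠ 0 ∧
      (∀ k, i ≤ k → k < pvSkipZeros arr i → arr.getD k 0 = 0) := by
  intro i
  induction i using (pvSkipZeros.induct arr) with
  | case1 i hi ih =>
    intro hex
    rw [pvSkipZeros, if_pos hi]
    obtain ⟨k, hik, hk, hkz⟩ := hex
    have hik' : i + 1 ≤ k := by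
      rcases Nat.lt_or_ge i k with h | h
      · omega
      · exfalso; have : i = k := by omega
        subst this; exact hkz hi.2
    obtain ⟨h1, h2, h3, h4⟩ := ih ⟨k, hik', hk, hkz⟩
    refine ⟨by omega, h2, h3, ?_⟩
    intro j hij hjlt
    rcases Nat.lt_or_ge j (i + 1) with h | h
    · have : j = i := by omega
      subst this; exact hi.2
    · exact h4 j h hjlt
  | case2 i hi =>
    intro hex
    rw [pvSkipZeros, if_neg hi]
    rw [not_and_or] at hi
    obtain ⟨k, hik, hk, hkz⟩ := hex
    rcases Nat.lt_or_ge i arr.length with h | h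
    · refine ⟨le_refl _, h, ?_, fun k h1 h2 => by omega⟩
      rcases hi with hi | hi
      · exact absurd h hi
      · exact hi
    · exfalso; omega

-- A's strict-update minimum loop is the running min over the nonzero entries.
theorem pvFoldMin_eq : ∀ (l : List Int) (m : Int),
    l.foldl (fun mini v => if v ≠ 0 ∧ v < mini then v else mini) m
      = (l.filter (fun v => !decide (v = 0))).foldl min m := by
  intro l
  induction l with
  | nil => intro m; rfl
  | cons x t ih =>
    intro m
    by_cases hx : x = 0
    · simp [hx, ih]
    · simp only [List.foldl_cons, List.filter_cons, hx, decide_false, Bool.not_false, if_pos, ih]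
      congr 1
      by_cases hlt : x < m <;> simp [hlt, hx, min_def]

-- B's conditional set-building pass: the result is duplicate-free and holds exactly the
-- elements of the list satisfying P (plus the start set).
theorem pvSetFold_spec (P : Int → Prop) [DecidablePred P] : ∀ (l : List Int) (s0 : PySem.Set Int),
    s0.Nodup →
    ((l.foldl (fun (s : PySem.Set Int) v => if P v then s.add v else s) s0).Nodup ∧
     ∀ x, x ∈ l.foldl (fun (s : PySem.Set Int) v => if P v then s.add v else s) s0 ↔ (x ∈ s0 ∨ (x ∈ l ∧ P x))) := by
  intro l
  induction l with
  | nil => intro s0 h; simpa using h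
  | cons v t ih =>
    intro s0 h0
    simp only [List.foldl_cons]
    by_cases hv : P v
    · rw [if_pos hv]
      obtain ⟨h1, h2⟩ := ih (s0.add v) (PySem.Set.nodup_add s0 v h0)
      refine ⟨h1, fun x => ?_⟩
      rw [h2 x, PySem.Set.mem_add]
      constructor
      · rintro ((h | h) | h)
        · exact Or.inl h
        · subst h; exact Or.inr ⟨List.mem_cons_self .., hv⟩
        · exact Or.inr ⟨List.mem_cons_of_mem _ h.1, h.2⟩
      · rintro (h | ⟨hm, hp⟩)
        · exact Or.inl (Or.inl h)
        · rcases List.mem_cons.1 hm with h | h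
          · exact Or.inl (Or.inr h)
          · exact Or.inr ⟨h, hp⟩
    · rw [if_neg hv]
      obtain ⟨h1, h2⟩ := ih s0 h0
      refine ⟨h1, fun x => ?_⟩
      rw [h2 x]
      constructor
      · rintro (h | h)
        · exact Or.inl h
        · exact Or.inr ⟨List.mem_cons_of_mem _ h.1, h.2⟩
      · rintro (h | ⟨hm, hp⟩)
        · exact Or.inl h
        · rcases List.mem_cons.1 hm with h | h
          · subst h; exact absurd hp hv
          · exact Or.inr ⟨h, hp⟩

-- A's positiveMin equals B's min-of-the-nonzero-elements.
theorem pvPositiveMin_eq (arr : List Int)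
    (hnz : ∃ k, k < arr.length ∧ arr.getD k 0 ≠ 0) :
    positiveMin arr ↑arr.length
      = (PySem.List.min? (arr.filter (fun v => !decide (v = 0))) (fun y => y)).getD 0 := by
  obtain ⟨hle, hj, hjz, hall⟩ := pvSkipZeros_spec arr 0
    (by obtain ⟨k, h1, h2⟩ := hnz; exact ⟨k, Nat.zero_le _, h1, h2⟩)
  set j := pvSkipZeros arr 0 with hjdef
  have hfilter : arr.filter (fun v => !decide (v = 0))
      = arr.getD j 0 :: (arr.drop (j + 1)).filter (fun v => !decide (v = 0)) := by
    conv_lhs => rw [← List.take_append_drop j arr]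
    rw [List.filter_append]
    have h1 : (arr.take j).filter (fun v => !decide (v = 0)) = [] := by
      rw [List.filter_eq_nil_iff]
      intro x hx
      obtain ⟨i, hi, hix⟩ := List.getElem_of_mem hx
      have hij : i < j := by
        have := List.length_take (l := arr) (i := j); omega
      have hil : i < arr.length := by
        have := List.length_take (l := arr) (i := j); omega
      rw [List.getElem_take] at hix
      have : arr.getD i 0 = x := by rw [List.getD_eq_getElem arr 0 hil, hix]
      rw [← this, hall i (Nat.zero_le _) hij]
      simp
    have h2 : arr.drop j = arr.getD j 0 :: arr.drop (j + 1) := by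
      rw [List.drop_eq_getElem_cons hj, List.getD_eq_getElem arr 0 hj]
    rw [h1, h2, List.filter_cons, if_pos (by simpa using hjz)]
    simp
  unfold positiveMin
  simp only []
  rw [← hjdef]
  rw [PySem.List.pyGetD_natCast]
  have hcast : ((j : Int) + 1) = ((j + 1 : Nat) : Int) := by push_cast; ring
  rw [hcast,
    PySem.List.foldl_pyRange_pyGetD' arr 0
      (fun mini v => if v ≠ 0 ∧ v < mini then v else mini) (arr.getD j 0)
      (Int.natCast_nonneg _)]
  rw [Int.toNat_natCast, pvFoldMin_eq, hfilter, PySem.List.min?_id_cons]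
  rfl

-- the two 0/1-counting loop shapes, as casts of countP
theorem pvZeroCount_eq (l : List Int) :
    l.foldl (fun z val => if val = 0 then z + 1 else z) (0 : Int)
      = ((l.countP (fun v => decide (v = 0)) : Nat) : Int) := by
  have h := PySem.List.foldl_count_if (fun v => decide (v = 0)) l 0
  simp only [decide_eq_true_eq, zero_add] at h
  exact h

theorem pvMissingCount_eq (arr : List Int) (l : List Int) :
    l.foldl (fun m val => if val ∈ arr then m else m + 1) (0 : Int)
      = ((l.countP (fun v => !decide (v ∈ arr)) : Nat) : Int) := by
  have h := PySem.List.foldl_count_if (fun v => !decide (v ∈ arr)) l 0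
  simp only [Bool.not_eq_eq_eq_not, Bool.not_true, decide_eq_false_iff_not, ite_not, zero_add] at h
  exact h

-- ===== VERDICT (by name: the statement is the Claim_ definition above) =====
theorem arrayHasRange_spec : Claim_equal_arrayHasRange := by
  intro arr _ hpre
  unfold Spec_arrayHasRange arrayHasRange arrayHasRange_alt
  cases hmax : PySem.List.max? arr (fun y => y) with
  | none => simp
  | some maxi =>
    simp only []
    by_cases h0 : maxi = 0
    · simp [h0]
    · simp only [if_neg h0]
      -- the nonzero witness for positiveMin
      have hmem : maxi ∈ arr := PySem.List.max?_mem hmax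
      have hnz : ∃ k, k < arr.length ∧ arr.getD k 0 ≠ 0 := by
        obtain ⟨k, hk, hkx⟩ := List.mem_iff_getElem.1 hmem
        exact ⟨k, hk, by rw [List.getD_eq_getElem arr 0 hk, hkx]; exact h0⟩
      set mn := (PySem.List.min? (arr.filter (fun v => !decide (v = 0))) (fun y => y)).getD 0 with hmndef
      rw [pvPositiveMin_eq arr hnz, ← hmndef]
      -- split B's paired fold into its two independent loops
      rw [PySem.List.foldl_prod_mk
        (f := fun (z : Int) v => if v = 0 then z + 1 else z)
        (g := fun (s : PySem.Set Int) v => if mn < v ∧ v < maxi then s.add v else s)]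
      simp only []
      -- the zero counts agree (same loop) and are nonnegative
      set zc := arr.foldl (fun z val => if val = 0 then z + 1 else z) (0 : Int) with hzc
      have hz0 : 0 ≤ zc := by rw [hzc, pvZeroCount_eq]; exact Int.natCast_nonneg _
      -- B's set: nodup + membership
      obtain ⟨hSnd, hSmem⟩ := pvSetFold_spec (fun v => mn < v ∧ v < maxi) arr (PySem.Set.ofList [])
        (PySem.Set.nodup_ofList [])
      set S := arr.foldl (fun (s : PySem.Set Int) v => if mn < v ∧ v < maxi then s.add v else s)
        (PySem.Set.ofList []) with hSdef
      by_cases hdeg : maxi ≤ mn + 1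
      · -- empty candidate range: both sides are true
        rw [PySem.List.pyRange_one_eq_nil hdeg]
        simp only [List.foldl_nil]
        rw [if_pos hz0, eq_comm, decide_eq_true_iff]
        have : (0 : Int) ≤ (S.length : Int) := Int.natCast_nonneg _
        omega
      · -- missing counts agree: range count of absentees = interval size − set size
        rw [pvMissingCount_eq]
        have hsum := List.length_eq_countP_add_countP (fun v => decide (v ∈ arr))
          (l := PySem.List.pyRange (mn + 1) maxi)
        have hlen : (PySem.List.pyRange (mn + 1) maxi).length = (maxi - (mn + 1)).toNat :=
          PySem.List.length_pyRange_one _ _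
        have hperm : ((PySem.List.pyRange (mn + 1) maxi).filter (fun v => decide (v ∈ arr))).Perm S := by
          refine (List.perm_ext_iff_of_nodup
            ((PySem.List.nodup_pyRange_one _ _).filter _) hSnd).2 ?_
          intro x
          rw [List.mem_filter, PySem.List.mem_pyRange_one, hSmem x]
          simp only [PySem.Set.mem_ofList, List.not_mem_nil, false_or, decide_eq_true_eq]
          constructor
          · rintro ⟨⟨h1, h2⟩, h3⟩; exact ⟨h3, by omega, h2⟩
          · rintro ⟨h1, h2, h3⟩; exact ⟨⟨by omega, h3⟩, h1⟩
        have hcount : (PySem.List.pyRange (mn + 1) maxi).countP (fun v => decide (v ∈ arr))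
            = S.length := by
          rw [List.countP_eq_length_filter]; exact hperm.length_eq
        have hmiss : (((PySem.List.pyRange (mn + 1) maxi).countP (fun v => !decide (v ∈ arr)) : Nat) : Int)
            = (maxi - mn - 1) - (S.length : Int) := by
          have hcc : (PySem.List.pyRange (mn + 1) maxi).countP (fun v => !decide (v ∈ arr))
              + S.length = (maxi - (mn + 1)).toNat := by
            have h2 := hsum
            simp only [decide_not, decide_eq_true_eq] at h2
            rw [← hcount, ← hlen]
            omega
          have hge : mn + 1 ≤ maxi := by omega
          have : ((maxi - (mn + 1)).toNat : Int) = maxi - mn - 1 := by omega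
          omega
        rw [hmiss]
        by_cases hfin : zc ≥ (maxi - mn - 1) - (S.length : Int) <;> simp [hfin]
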